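-- pv_equiv track=rewrite | github.com/wenting-zhao/verification_scaling | verification_scaling/utils.py | get_easy_test_cases_with_unique_outputs
-- ===== SOURCE A (Python) =====
-- def get_easy_test_cases_with_unique_outputs(test_cases, n):
--     if len(test_cases) == 0:
--         return []
--
--     # Parse test cases to extract outputs and calculate input lengths
--     parsed_tests = []
--
--     for test in test_cases:
--         # Extract output
--         if "==" in test:
--             output = test.split("==")[1].strip()
--         else:
--             continue
--
--         # Remove quotes
--         output = output.strip('"\'')
--
--         # Extract arguments
--         start = test.find("(")
--         end = test.rfind(")")
--         if start == -1 or end == -1: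
--             continue
--
--         args = test[start+1:end]
--         args_length = len(args)
--
--         parsed_tests.append((test, output, args_length))
--
--     # Sort all tests by argument length (shortest first)
--     parsed_tests.sort(key=lambda x: x[2])
--
--     # Take the first n tests with unique outputs
--     result = []
--     seen_outputs = set()
--
--     for test, output, _ in parsed_tests:
--         if output not in seen_outputs:
--             result.append(test)
--             seen_outputs.add(output)
--
--             if len(result) >= n:
--                 break
--
--     # If we still need more, add additional tests with already seen outputs
--     if len(result) < n:
--         output_counts = {}
--         for test, output, _ in parsed_tests:
--             if test in result:
--                 continue
--
--             if output not in output_counts: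
--                 output_counts[output] = 0
--
--             # Only consider tests where we've already used this output
--             if output in seen_outputs:
--                 output_counts[output] += 1
--                 if output_counts[output] == 1:  # Take the next shortest for each output
--                     result.append(test)
--                     if len(result) >= n:
--                         break
--
--     return result
-- ===== SOURCE B (Python) =====
-- def _parse(test):
--     if "==" not in test:
--         return None
--     start = test.find("(")
--     end = test.rfind(")")
--     if start == -1 or end == -1:
--         return None
--     output = test.split("==")[1].strip().strip('"\'')
--     return (test, output, len(test[start + 1:end]))
--
--
-- def get_easy_test_cases_with_unique_outputs(test_cases, n):
--     if n <= 0: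
--         return []
--     parsed = [p for p in map(_parse, test_cases) if p is not None]
--     parsed.sort(key=lambda x: x[2])
--     firsts = {}   # output -> its shortest test
--     seconds = {}  # output -> next shortest test with a different text
--     order0, order1 = [], []
--     for test, output, _ in parsed:
--         f = firsts.get(output)
--         if f is None:
--             firsts[output] = test
--             order0.append(test)
--         elif output not in seconds and test != f:
--             seconds[output] = test
--             order1.append(test)
--     return (order0 + order1)[:n]
-- ===== Notes on version B (the rewrite author's own statement) =====
-- stated objective: alternative
-- what changed: Replaces A's two selection passes over the sorted parsed tests (a seen-set pass with an early break, then a counts-dict pass that rescans and tests list membership in the growing result) by a single annotate pass that records per output its first test and its first differing second test in two ordered lists, returning (order0 + order1)[:n].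
-- intended difference: When n <= 0 and at least one test case parses, A returns a one-element list (its length check runs only after the first append) while B returns [], the intended result of asking for at most 0 test cases. — e.g. on get_easy_test_cases_with_unique_outputs(["f(1)==2"], 0): A returns ["f(1)==2"], B returns []
import Mathlib
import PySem

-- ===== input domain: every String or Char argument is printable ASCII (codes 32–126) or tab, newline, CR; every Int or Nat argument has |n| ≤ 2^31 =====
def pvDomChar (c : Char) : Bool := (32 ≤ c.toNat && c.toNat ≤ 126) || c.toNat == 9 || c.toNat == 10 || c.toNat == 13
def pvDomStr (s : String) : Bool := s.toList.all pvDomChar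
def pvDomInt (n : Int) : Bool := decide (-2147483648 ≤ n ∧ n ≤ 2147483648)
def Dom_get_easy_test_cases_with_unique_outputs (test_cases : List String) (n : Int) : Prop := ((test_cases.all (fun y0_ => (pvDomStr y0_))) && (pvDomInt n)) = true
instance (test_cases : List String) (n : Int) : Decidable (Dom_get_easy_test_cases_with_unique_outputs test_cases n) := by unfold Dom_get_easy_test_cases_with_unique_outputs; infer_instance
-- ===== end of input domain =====

-- B replaces A's two selection passes (seen-set pass with break, then a counts-dict pass over the
-- whole list again with list-membership tests) by a single annotate pass that records, per output,
-- its first test and its first differing second test, then truncates order0 ++ order1 to n.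

-- ===== PORT A =====
-- test.split("==")[1] cannot raise ("==" occurs in test, so there are ≥ 2 parts) and the separator
-- "==" is nonempty, so both getD defaults below are unreachable.
def pvParseStepA (acc : List (String × String × Int)) (test : String) : List (String × String × Int) :=
  if PySem.Str.isIn "==" test then
    let output := PySem.Str.stripChars (PySem.Str.strip ((PySem.List.pyGet? ((PySem.Str.split? test "==").getD []) 1).getD "")) "\"'"
    let start := PySem.Str.find test "("
    let stop := PySem.Str.rfind test ")"
    if start = -1 ∨ stop = -1 then acc
    else acc ++ [(test, output, (PySem.Str.len (PySem.Str.slice test (some (start + 1)) (some stop)) : Int))]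
  else acc

def pvLoop1 (n : Int) : List (String × String × Int) → List String → PySem.Set String → List String × PySem.Set String
  | [], res, seen => (res, seen)
  | (t, o, _) :: rest, res, seen =>
    if PySem.Set.contains seen o = false then
      let res' := res ++ [t]
      let seen' := PySem.Set.add seen o
      if n ≤ (res'.length : Int) then (res', seen')
      else pvLoop1 n rest res' seen'
    else pvLoop1 n rest res seen

def pvLoop2 (n : Int) (seen : PySem.Set String) : List (String × String × Int) → List String → PySem.Dict String Int → List String
  | [], res, _ => res
  | (t, o, _) :: rest, res, counts =>
    if res.contains t then pvLoop2 n seen rest res counts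
    else
      let counts1 := if PySem.Dict.contains counts o = false then counts.insert o 0 else counts
      if PySem.Set.contains seen o then
        let counts2 := counts1.modify o 0 (· + 1)
        if counts2.getD o 0 = 1 then
          let res' := res ++ [t]
          if n ≤ (res'.length : Int) then res'
          else pvLoop2 n seen rest res' counts2
        else pvLoop2 n seen rest res counts2
      else pvLoop2 n seen rest res counts1

def get_easy_test_cases_with_unique_outputs (test_cases : List String) (n : Int) : List String :=
  if test_cases.length = 0 then []
  else
    let parsed := test_cases.foldl pvParseStepA []
    let sp := PySem.List.sorted parsed (fun x => x.2.2) false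
    let r1 := pvLoop1 n sp [] PySem.Set.empty
    if (r1.1.length : Int) < n then pvLoop2 n r1.2 sp r1.1 PySem.Dict.empty else r1.1

-- ===== PORT B =====
-- same unreachable-default remark as for port A
def pvParse (test : String) : Option (String × String × Int) :=
  if PySem.Str.isIn "==" test = false then none
  else
    let start := PySem.Str.find test "("
    let stop := PySem.Str.rfind test ")"
    if start = -1 ∨ stop = -1 then none
    else
      let output := PySem.Str.stripChars (PySem.Str.strip ((PySem.List.pyGet? ((PySem.Str.split? test "==").getD []) 1).getD "")) "\"'"
      some (test, output, (PySem.Str.len (PySem.Str.slice test (some (start + 1)) (some stop)) : Int))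

def pvBStep (s : PySem.Dict String String × PySem.Dict String String × List String × List String)
    (p : String × String × Int) :
    PySem.Dict String String × PySem.Dict String String × List String × List String :=
  match s, p with
  | (fs, sc, o0, o1), (t, o, _) =>
    match fs.get? o with
    | none => (fs.insert o t, sc, o0 ++ [t], o1)
    | some f =>
      if sc.contains o = false ∧ t ≠ f then (fs, sc.insert o t, o0, o1 ++ [t])
      else (fs, sc, o0, o1)

def get_easy_test_cases_with_unique_outputs_alt (test_cases : List String) (n : Int) : List String :=
  if n ≤ 0 then []
  else
    let parsed := (test_cases.map pvParse).filterMap id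
    let sp := PySem.List.sorted parsed (fun x => x.2.2) false
    let st := sp.foldl pvBStep (PySem.Dict.empty, PySem.Dict.empty, [], [])
    PySem.List.slice (st.2.2.1 ++ st.2.2.2) none (some n)

-- ===== PRECONDITION & SPEC =====
def pvParses (t : String) : Bool :=
  PySem.Str.isIn "==" t && decide (PySem.Str.find t "(" ≠ -1) && decide (PySem.Str.rfind t ")" ≠ -1)

-- When n ≤ 0 and some test case parses, A still returns one test (its length check fires only
-- after the first append) while B returns the empty list, the intended result of asking for
-- at most 0 test cases.
def D_get_easy_test_cases_with_unique_outputs (test_cases : List String) (n : Int) : Prop :=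
  n ≤ 0 ∧ ∃ t ∈ test_cases, pvParses t = true
instance (test_cases : List String) (n : Int) : Decidable (D_get_easy_test_cases_with_unique_outputs test_cases n) := by
  unfold D_get_easy_test_cases_with_unique_outputs; infer_instance

def Spec_get_easy_test_cases_with_unique_outputs (test_cases : List String) (n : Int) (out : List String) : Prop := ¬ D_get_easy_test_cases_with_unique_outputs test_cases n → out = get_easy_test_cases_with_unique_outputs_alt test_cases n
instance (test_cases : List String) (n : Int) (out : List String) : Decidable (Spec_get_easy_test_cases_with_unique_outputs test_cases n out) := by unfold Spec_get_easy_test_cases_with_unique_outputs; infer_instance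

def pvDiffWitness_get_easy_test_cases_with_unique_outputs : List String × Int := (["f(1)==2"], 0)
def pvDiffWitnessOut_get_easy_test_cases_with_unique_outputs : (List String) × (List String) := (["f(1)==2"], [])

-- ===== CLAIM (what is proved, stated in full; the proofs are below) =====
def Claim_unchanged_get_easy_test_cases_with_unique_outputs : Prop := ∀ (test_cases : List String) (n : Int), Dom_get_easy_test_cases_with_unique_outputs test_cases n → Spec_get_easy_test_cases_with_unique_outputs test_cases n (get_easy_test_cases_with_unique_outputs test_cases n)
def Claim_changed_get_easy_test_cases_with_unique_outputs : Prop := Dom_get_easy_test_cases_with_unique_outputs (pvDiffWitness_get_easy_test_cases_with_unique_outputs.1) (pvDiffWitness_get_easy_test_cases_with_unique_outputs.2) ∧ D_get_easy_test_cases_with_unique_outputs (pvDiffWitness_get_easy_test_cases_with_unique_outputs.1) (pvDiffWitness_get_easy_test_cases_with_unique_outputs.2) ∧ get_easy_test_cases_with_unique_outputs (pvDiffWitness_get_easy_test_cases_with_unique_outputs.1) (pvDiffWitness_get_easy_test_cases_with_unique_outputs.2) = pvDiffWitnessOut_get_easy_test_cases_with_unique_outputs.1 ∧ get_easy_test_cases_with_unique_outputs_alt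 (pvDiffWitness_get_easy_test_cases_with_unique_outputs.1) (pvDiffWitness_get_easy_test_cases_with_unique_outputs.2) = pvDiffWitnessOut_get_easy_test_cases_with_unique_outputs.2 ∧ pvDiffWitnessOut_get_easy_test_cases_with_unique_outputs.1 ≠ pvDiffWitnessOut_get_easy_test_cases_with_unique_outputs.2
def Claim_exact_get_easy_test_cases_with_unique_outputs : Prop := ∀ (test_cases : List String) (n : Int), Dom_get_easy_test_cases_with_unique_outputs test_cases n → D_get_easy_test_cases_with_unique_outputs test_cases n → get_easy_test_cases_with_unique_outputs test_cases n ≠ get_easy_test_cases_with_unique_outputs_alt test_cases n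

-- ===== LEMMAS AND PROOFS =====

-- the output each parsed test carries is a function of the test string alone
def pvOut (test : String) : String :=
  PySem.Str.stripChars (PySem.Str.strip ((PySem.List.pyGet? ((PySem.Str.split? test "==").getD []) 1).getD "")) "\"'"

-- assoc-list model of B's pass: pvG S fA sA = (new first tests, new second tests)
def pvG : List (String × String × Int) → List (String × String) → List (String × String) → List String × List String
  | [], _, _ => ([], [])
  | (t, o, _) :: r, fA, sA =>
    match fA.lookup o with
    | none => let p := pvG r ((o, t) :: fA) sA; (t :: p.1, p.2)
    | some f =>
      if sA.lookup o = none ∧ t ≠ f then let p := pvG r fA ((o, t) :: sA); (p.1, t :: p.2)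
      else pvG r fA sA

-- the first-test-per-output table accumulated along S
def pvBuildF : List (String × String × Int) → List (String × String) → List (String × String)
  | [], fA => fA
  | (t, o, _) :: r, fA =>
    if (fA.lookup o).isSome then pvBuildF r fA else pvBuildF r ((o, t) :: fA)

theorem pvLookup_cons_ne {β : Type} (o o' : String) (v : β) (l : List (String × β)) (ho : o ≠ o') :
    List.lookup o ((o', v) :: l) = List.lookup o l := by
  rw [List.lookup_cons, show (o == o') = false by simp [ho]]

-- parsing: A's fold equals B's filterMap
theorem pvParseStepA_eq (acc : List (String × String × Int)) (t : String) :
    pvParseStepA acc t = acc ++ (pvParse t).toList := by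
  unfold pvParseStepA pvParse
  by_cases h1 : PySem.Chars.isIn ['=', '='] t.toList = true <;>
    by_cases h2 : PySem.Chars.find t.toList ['('] = -1 ∨ PySem.Chars.rfind t.toList [')'] = -1 <;>
      simp [h1, h2]

theorem pvParsedA_eq (tc : List String) :
    ∀ acc, tc.foldl pvParseStepA acc = acc ++ (tc.map pvParse).filterMap id := by
  induction tc with
  | nil => simp
  | cons t r ih =>
    intro acc
    simp only [List.map_cons, List.filterMap_cons, List.foldl_cons]
    rw [pvParseStepA_eq, ih]
    cases pvParse t <;> simp

theorem pvParse_shape (t : String) (p : String × String × Int) (h : pvParse t = some p) :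
    p.1 = t ∧ p.2.1 = pvOut t := by
  unfold pvParse at h; unfold pvOut
  by_cases h1 : PySem.Str.isIn "==" t = false
  · rw [if_pos h1] at h; cases h
  · rw [if_neg h1] at h
    by_cases h2 : PySem.Str.find t "(" = -1 ∨ PySem.Str.rfind t ")" = -1
    · rw [if_pos h2] at h; cases h
    · rw [if_neg h2] at h
      simp only [Option.some.injEq] at h
      subst h; exact ⟨rfl, rfl⟩

theorem pvParse_isSome (t : String) : (pvParse t).isSome = pvParses t := by
  unfold pvParse pvParses
  by_cases h1 : PySem.Chars.isIn ['=', '='] t.toList = true <;>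
    by_cases h2 : PySem.Chars.find t.toList ['('] = -1 <;>
      by_cases h3 : PySem.Chars.rfind t.toList [')'] = -1 <;>
        simp [PySem.Str.isIn, h1, h2, h3]

-- pvBuildF basic facts
theorem pvBuildF_pres (S : List (String × String × Int)) :
    ∀ fA o v, fA.lookup o = some v → (pvBuildF S fA).lookup o = some v := by
  induction S with
  | nil => intro fA o v h; simpa [pvBuildF] using h
  | cons p r ih =>
    intro fA o v h
    obtain ⟨t, o', l⟩ := p
    unfold pvBuildF
    split_ifs with hs
    · exact ih fA o v h
    · refine ih _ o v ?_
      by_cases ho : o = o'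
      · subst ho; simp_all
      · rwa [pvLookup_cons_ne _ _ _ _ ho]

theorem pvBuildF_covers (S : List (String × String × Int)) :
    ∀ fA p, p ∈ S → ((pvBuildF S fA).lookup p.2.1).isSome := by
  induction S with
  | nil => intro _ _ h; simp at h
  | cons q r ih =>
    intro fA p hp
    obtain ⟨t, o', l⟩ := q
    rcases List.mem_cons.mp hp with h | h
    · subst h
      unfold pvBuildF
      split_ifs with hs
      · obtain ⟨v, hv⟩ := Option.isSome_iff_exists.mp hs
        simp [pvBuildF_pres r fA _ v hv]
      · have : ((o', t) :: fA).lookup o' = some t := List.lookup_cons_self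
        simp [pvBuildF_pres r _ _ t this]
    · unfold pvBuildF; split_ifs <;> exact ih _ p h

theorem pvBuildF_sub (S : List (String × String × Int)) :
    ∀ fA o v, (pvBuildF S fA).lookup o = some v →
      fA.lookup o = some v ∨ ∃ l, (v, o, l) ∈ S := by
  induction S with
  | nil => intro fA o v h; exact Or.inl (by simpa [pvBuildF] using h)
  | cons q r ih =>
    intro fA o v h
    obtain ⟨t, o', l⟩ := q
    unfold pvBuildF at h
    split_ifs at h with hs
    · rcases ih fA o v h with h' | ⟨l', hl'⟩
      · exact Or.inl h'
      · exact Or.inr ⟨l', List.mem_cons_of_mem _ hl'⟩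
    · rcases ih _ o v h with h' | ⟨l', hl'⟩
      · by_cases ho : o = o'
        · subst ho; rw [List.lookup_cons_self] at h'
          injection h' with h''
          exact Or.inr ⟨l, by simp [h''.symm]⟩
        · exact Or.inl (by rwa [pvLookup_cons_ne _ _ _ _ ho] at h')
      · exact Or.inr ⟨l', List.mem_cons_of_mem _ hl'⟩

-- take of an append that just reached the cut
theorem pvTake_append_succ (res : List String) (t : String) (X : List String) :
    (res ++ t :: X).take (res.length + 1) = res ++ [t] := by
  rw [List.take_append]
  simp

-- round 1 computes the first n new-output tests and, short of n, remembers every output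
theorem pvLoop1_eq (n : Int) :
    ∀ (S : List (String × String × Int)) (res : List String) (seen : PySem.Set String)
      (fA sA : List (String × String)),
      (∀ o, PySem.Set.contains seen o = true ↔ (fA.lookup o).isSome) →
      (res.length : Int) < n →
      (pvLoop1 n S res seen).1 = (res ++ (pvG S fA sA).1).take n.toNat
      ∧ (((res ++ (pvG S fA sA).1).length : Int) < n →
          ∀ o, PySem.Set.contains (pvLoop1 n S res seen).2 o = true ↔ ((pvBuildF S fA).lookup o).isSome) := by
  intro S
  induction S with
  | nil =>
    intro res seen fA sA hseen hlen
    constructor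
    · simp only [pvLoop1, pvG]
      rw [List.append_nil, List.take_of_length_le (by omega)]
    · intro _ o; simpa [pvLoop1, pvBuildF] using hseen o
  | cons q rest ih =>
    intro res seen fA sA hseen hlen
    obtain ⟨t, o, l⟩ := q
    by_cases hs : PySem.Set.contains seen o = true
    · -- output already seen: both skip
      obtain ⟨f, hf⟩ := Option.isSome_iff_exists.mp ((hseen o).mp hs)
      have hG : (pvG ((t, o, l) :: rest) fA sA) =
          (if sA.lookup o = none ∧ t ≠ f then
            (let p := pvG rest fA ((o, t) :: sA); (p.1, t :: p.2)) else pvG rest fA sA) := by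
        simp [pvG, hf]
      have hB : pvBuildF ((t, o, l) :: rest) fA = pvBuildF rest fA := by
        simp [pvBuildF, hf]
      have hL : pvLoop1 n ((t, o, l) :: rest) res seen = pvLoop1 n rest res seen := by
        have hs2 : ¬ (PySem.Set.contains seen o = false) := by rw [hs]; simp
        simp only [pvLoop1]
        rw [if_neg hs2]
      rw [hL, hG, hB]
      split_ifs with hc
      · exact ih res seen fA ((o, t) :: sA) hseen hlen
      · exact ih res seen fA sA hseen hlen
    · -- new output
      have hlk : fA.lookup o = none := by
        cases h : fA.lookup o with
        | none => rfl
        | some v => exact absurd ((hseen o).mpr (by simp [h])) hs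
      have hG : pvG ((t, o, l) :: rest) fA sA =
          (let p := pvG rest ((o, t) :: fA) sA; (t :: p.1, p.2)) := by
        simp [pvG, hlk]
      have hB : pvBuildF ((t, o, l) :: rest) fA = pvBuildF rest ((o, t) :: fA) := by
        simp [pvBuildF, hlk]
      have hseen' : ∀ o', PySem.Set.contains (PySem.Set.add seen o) o' = true ↔
          (((o, t) :: fA).lookup o').isSome := by
        intro o'
        rw [PySem.Set.contains_iff, PySem.Set.mem_add]
        by_cases ho : o' = o
        · subst ho; simp [List.lookup_cons_self]
        · rw [pvLookup_cons_ne _ _ _ _ ho, ← hseen o', PySem.Set.contains_iff]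
          simp [ho]
      have hs' : PySem.Set.contains seen o = false := by
        revert hs; cases PySem.Set.contains seen o <;> simp
      rw [hG, hB]
      simp only [pvLoop1]
      rw [if_pos hs']
      by_cases hbrk : n ≤ ((res ++ [t]).length : Int)
      · rw [if_pos hbrk]
        have hn1 : n.toNat = res.length + 1 := by
          simp only [List.length_append, List.length_cons, List.length_nil] at hbrk ⊢; omega
        constructor
        · simpa [hn1] using (pvTake_append_succ res t _).symm
        · intro hcon
          exfalso
          simp only [List.length_append, List.length_cons] at hbrk hcon
          omega
      · rw [if_neg hbrk]
        have hlen' : (((res ++ [t]).length : Int)) < n := by omega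
        have := ih (res ++ [t]) (PySem.Set.add seen o) ((o, t) :: fA) sA hseen' hlen'
        constructor
        · rw [this.1]; simp
        · intro hcon
          refine this.2 ?_
          simpa using hcon

-- round 2 appends, per output, the next shortest differing test
theorem pvLoop2_eq (n : Int) (seen : PySem.Set String) (F : List (String × String)) :
    ∀ (S : List (String × String × Int)) (res : List String) (counts : PySem.Dict String Int)
      (sA : List (String × String)),
      (∀ p ∈ S, PySem.Set.contains seen p.2.1 = true) →
      (∀ p ∈ S, p.2.1 = pvOut p.1) →
      (∀ p ∈ S, (F.lookup p.2.1).isSome) →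
      (∀ p ∈ S, (res.contains p.1 = true ↔ (F.lookup p.2.1 = some p.1 ∨ sA.lookup p.2.1 = some p.1))) →
      (∀ o, 0 ≤ counts.getD o 0 ∧ (1 ≤ counts.getD o 0 ↔ (sA.lookup o).isSome)) →
      (res.length : Int) < n →
      pvLoop2 n seen S res counts = (res ++ (pvG S F sA).2).take n.toNat := by
  intro S
  induction S with
  | nil =>
    intro res counts sA _ _ _ _ _ hlen
    simp only [pvLoop2, pvG]
    rw [List.append_nil, List.take_of_length_le (by omega)]
  | cons q rest ih =>
    intro res counts sA hseen hOK hI0 hI1 hI2 hlen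
    obtain ⟨t, o, l⟩ := q
    obtain ⟨f, hf⟩ := Option.isSome_iff_exists.mp (hI0 (t, o, l) List.mem_cons_self)
    have hG : (pvG ((t, o, l) :: rest) F sA) =
        (if sA.lookup o = none ∧ t ≠ f then
          (let p := pvG rest F ((o, t) :: sA); (p.1, t :: p.2)) else pvG rest F sA) := by
      simp [pvG, hf]
    by_cases hmem : res.contains t = true
    · -- test already taken: both skip
      have := (hI1 (t, o, l) List.mem_cons_self).mp hmem
      have hcond : ¬ (sA.lookup o = none ∧ t ≠ f) := by
        rcases this with h | h
        · rw [hf] at h; injection h with h'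
          exact fun hc => hc.2 h'.symm
        · exact fun hc => by rw [hc.1] at h; cases h
      rw [hG, if_neg hcond]
      have hL : pvLoop2 n seen ((t, o, l) :: rest) res counts = pvLoop2 n seen rest res counts := by
        simp only [pvLoop2]
        rw [if_pos hmem]
      rw [hL]
      exact ih res counts sA (fun p hp => hseen p (List.mem_cons_of_mem _ hp))
        (fun p hp => hOK p (List.mem_cons_of_mem _ hp))
        (fun p hp => hI0 p (List.mem_cons_of_mem _ hp))
        (fun p hp => hI1 p (List.mem_cons_of_mem _ hp)) hI2 hlen
    · -- fresh test string
      have hne := (hI1 (t, o, l) List.mem_cons_self)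
      have hnotor : ¬ (F.lookup o = some t ∨ sA.lookup o = some t) := fun h => hmem (hne.mpr h)
      have hft : f ≠ t := fun h => hnotor (Or.inl (h ▸ hf))
      have hsat : sA.lookup o ≠ some t := fun h => hnotor (Or.inr h)
      have hsA : PySem.Set.contains seen o = true := hseen (t, o, l) List.mem_cons_self
      -- the setdefault-style insert does not change any getD value
      set counts1 := if PySem.Dict.contains counts o = false then counts.insert o 0 else counts with hc1def
      have hc1 : ∀ o', counts1.getD o' 0 = counts.getD o' 0 := by
        intro o'
        rw [hc1def]
        split_ifs with h
        · rw [PySem.Dict.getD_insert]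
          split_ifs with h2
          · rw [h2, PySem.Dict.getD_of_not_contains counts 0 h]
          · rfl
        · rfl
      set counts2 := counts1.modify o 0 (· + 1) with hc2def
      have hc2 : ∀ o', counts2.getD o' 0 = if o' = o then counts.getD o 0 + 1 else counts.getD o' 0 := by
        intro o'
        rw [hc2def, PySem.Dict.getD_modify]
        split_ifs with h
        · rw [hc1 o]
        · rw [hc1 o']
      have hL : pvLoop2 n seen ((t, o, l) :: rest) res counts =
          (if counts2.getD o 0 = 1 then
             (if n ≤ (((res ++ [t]).length : Int)) then res ++ [t]
              else pvLoop2 n seen rest (res ++ [t]) counts2)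
           else pvLoop2 n seen rest res counts2) := by
        simp only [pvLoop2]
        rw [if_neg hmem, ← hc1def, if_pos hsA, ← hc2def]
      rw [hL]
      by_cases hsa : sA.lookup o = none
      · -- first non-skipped entry of this output group: taken
        have hz : counts.getD o 0 = 0 := by
          have h2 := hI2 o
          have h1 : ¬ (1 ≤ counts.getD o 0) := by
            rw [h2.2, hsa]; simp
          omega
        have hone : counts2.getD o 0 = 1 := by rw [hc2, if_pos rfl, hz]; omega
        have hcondG : sA.lookup o = none ∧ t ≠ f := ⟨hsa, Ne.symm hft⟩
        rw [hG, if_pos hcondG, if_pos hone]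
        by_cases hbrk : n ≤ (((res ++ [t]).length : Int))
        · rw [if_pos hbrk]
          have hn1 : n.toNat = res.length + 1 := by
            simp only [List.length_append, List.length_cons, List.length_nil] at hbrk ⊢; omega
          simpa [hn1] using (pvTake_append_succ res t _).symm
        · rw [if_neg hbrk]
          have hI1' : ∀ p ∈ rest, ((res ++ [t]).contains p.1 = true ↔
              (F.lookup p.2.1 = some p.1 ∨ (((o, t) :: sA).lookup p.2.1 = some p.1))) := by
            intro p hp
            have hOKt : o = pvOut t := hOK (t, o, l) List.mem_cons_self
            have hOKp : p.2.1 = pvOut p.1 := hOK p (List.mem_cons_of_mem _ hp)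
            by_cases hq : p.1 = t
            · have ho' : p.2.1 = o := by rw [hOKp, hq, ← hOKt]
              constructor
              · intro _; exact Or.inr (by rw [ho', List.lookup_cons_self, hq])
              · intro _; simp [hq]
            · have hmm : (res ++ [t]).contains p.1 = res.contains p.1 := by
                simp [hq]
              rw [hmm]
              by_cases ho' : p.2.1 = o
              · have hold := hI1 p (List.mem_cons_of_mem _ hp)
                rw [ho'] at hold ⊢
                rw [hsa] at hold
                rw [List.lookup_cons_self]
                constructor
                · intro h; exact Or.inl ((hold.mp h).resolve_right (by simp))
                · rintro (h | h)
                  · exact hold.mpr (Or.inl h)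
                  · exact absurd (by injection h with h'; exact h'.symm) hq
              · rw [pvLookup_cons_ne _ _ _ _ ho']
                exact hI1 p (List.mem_cons_of_mem _ hp)
          have hI2' : ∀ o', 0 ≤ counts2.getD o' 0 ∧
              (1 ≤ counts2.getD o' 0 ↔ ((((o, t) :: sA)).lookup o').isSome) := by
            intro o'
            rw [hc2]
            by_cases h : o' = o
            · rw [if_pos h, h, List.lookup_cons_self, hz]
              simp
            · rw [if_neg h, pvLookup_cons_ne _ _ _ _ h]
              exact hI2 o'
          have := ih (res ++ [t]) counts2 ((o, t) :: sA)
            (fun p hp => hseen p (List.mem_cons_of_mem _ hp))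
            (fun p hp => hOK p (List.mem_cons_of_mem _ hp))
            (fun p hp => hI0 p (List.mem_cons_of_mem _ hp))
            hI1' hI2' (by simp only [List.length_append, List.length_cons, List.length_nil] at hbrk ⊢; omega)
          rw [this]; simp
      · -- a second was already taken for this output: count rises past 1, skipped
        obtain ⟨sv, hsv⟩ := Option.ne_none_iff_exists'.mp hsa
        have hge : 1 ≤ counts.getD o 0 := (hI2 o).2.mpr (by simp [hsv])
        have hnot1 : ¬ (counts2.getD o 0 = 1) := by
          have h2 := hc2 o; rw [if_pos rfl] at h2; omega
        rw [if_neg hnot1, hG, if_neg (fun hc => hsa hc.1)]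
        have hI2' : ∀ o', 0 ≤ counts2.getD o' 0 ∧ (1 ≤ counts2.getD o' 0 ↔ (sA.lookup o').isSome) := by
          intro o'
          rw [hc2]
          by_cases h : o' = o
          · rw [if_pos h, h]
            constructor
            · omega
            · rw [hsv]; simp; omega
          · rw [if_neg h]; exact hI2 o'
        exact ih res counts2 sA (fun p hp => hseen p (List.mem_cons_of_mem _ hp))
          (fun p hp => hOK p (List.mem_cons_of_mem _ hp))
          (fun p hp => hI0 p (List.mem_cons_of_mem _ hp))
          (fun p hp => hI1 p (List.mem_cons_of_mem _ hp)) hI2' hlen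

-- B's dict fold computes the assoc-list model
theorem pvBfold_eq :
    ∀ (S : List (String × String × Int)) (fs sc : PySem.Dict String String)
      (o0 o1 : List String) (fA sA : List (String × String)),
      (∀ o, fs.get? o = fA.lookup o) → (∀ o, sc.get? o = sA.lookup o) →
      (S.foldl pvBStep (fs, sc, o0, o1)).2.2.1 = o0 ++ (pvG S fA sA).1 ∧
      (S.foldl pvBStep (fs, sc, o0, o1)).2.2.2 = o1 ++ (pvG S fA sA).2 := by
  intro S
  induction S with
  | nil => intro fs sc o0 o1 fA sA _ _; simp [pvG]
  | cons q rest ih =>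
    intro fs sc o0 o1 fA sA hfs hsc
    obtain ⟨t, o, l⟩ := q
    simp only [List.foldl_cons]
    cases hlk : fA.lookup o with
    | none =>
      have hstep : pvBStep (fs, sc, o0, o1) (t, o, l) = (fs.insert o t, sc, o0 ++ [t], o1) := by
        simp [pvBStep, hfs o, hlk]
      rw [hstep]
      have hfs' : ∀ o', (fs.insert o t).get? o' = ((o, t) :: fA).lookup o' := by
        intro o'
        rw [PySem.Dict.get?_insert]
        by_cases h : o' = o
        · rw [if_pos h, h, List.lookup_cons_self]
        · rw [if_neg h, pvLookup_cons_ne _ _ _ _ h, hfs o']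
      have hg : pvG ((t, o, l) :: rest) fA sA =
          ((t :: (pvG rest ((o, t) :: fA) sA).1, (pvG rest ((o, t) :: fA) sA).2)) := by
        simp [pvG, hlk]
      rw [hg]
      have := ih (fs.insert o t) sc (o0 ++ [t]) o1 ((o, t) :: fA) sA hfs' hsc
      exact ⟨by rw [this.1]; simp, by rw [this.2]⟩
    | some f =>
      have hg : pvG ((t, o, l) :: rest) fA sA =
          (if sA.lookup o = none ∧ t ≠ f then
            ((pvG rest fA ((o, t) :: sA)).1, t :: (pvG rest fA ((o, t) :: sA)).2)
          else pvG rest fA sA) := by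
        simp [pvG, hlk]
      rw [hg]
      by_cases hcond : sA.lookup o = none ∧ t ≠ f
      · have hc : sc.contains o = false := by
          rw [PySem.Dict.contains_eq_isSome_get?, hsc o, hcond.1]; rfl
        have hstep : pvBStep (fs, sc, o0, o1) (t, o, l) = (fs, sc.insert o t, o0, o1 ++ [t]) := by
          simp [pvBStep, hfs o, hlk, hc, hcond.2]
        rw [hstep, if_pos hcond]
        have hsc' : ∀ o', (sc.insert o t).get? o' = ((o, t) :: sA).lookup o' := by
          intro o'
          rw [PySem.Dict.get?_insert]
          by_cases h : o' = o
          · rw [if_pos h, h, List.lookup_cons_self]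
          · rw [if_neg h, pvLookup_cons_ne _ _ _ _ h, hsc o']
        have := ih fs (sc.insert o t) o0 (o1 ++ [t]) fA ((o, t) :: sA) hfs hsc'
        exact ⟨by rw [this.1], by rw [this.2]; simp⟩
      · have hcD : ¬ (sc.contains o = false ∧ t ≠ f) := by
          intro hc
          refine hcond ⟨?_, hc.2⟩
          have h1 := hc.1
          rw [PySem.Dict.contains_eq_isSome_get?, hsc o] at h1
          cases h2 : sA.lookup o with
          | none => rfl
          | some v => rw [h2] at h1; cases h1
        have hstep : pvBStep (fs, sc, o0, o1) (t, o, l) = (fs, sc, o0, o1) := by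
          simp only [pvBStep, hfs o, hlk]
          rw [if_neg hcD]
        rw [hstep, if_neg hcond]
        exact ih fs sc o0 o1 fA sA hfs hsc

-- the first-pass picks are exactly the values of the firsts table
theorem pvMem_pvG_fst :
    ∀ (S : List (String × String × Int)) (fA sA : List (String × String)) (x : String),
      x ∈ (pvG S fA sA).1 ↔ ∃ o, fA.lookup o = none ∧ (pvBuildF S fA).lookup o = some x := by
  intro S
  induction S with
  | nil =>
    intro fA sA x
    simp only [pvG, pvBuildF]
    constructor
    · intro h; cases h
    · rintro ⟨o, h1, h2⟩; rw [h1] at h2; cases h2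
  | cons q rest ih =>
    intro fA sA x
    obtain ⟨t, o, l⟩ := q
    cases hlk : fA.lookup o with
    | none =>
      have hg : (pvG ((t, o, l) :: rest) fA sA).1 = t :: (pvG rest ((o, t) :: fA) sA).1 := by
        simp [pvG, hlk]
      have hb : pvBuildF ((t, o, l) :: rest) fA = pvBuildF rest ((o, t) :: fA) := by
        simp [pvBuildF, hlk]
      rw [hg, hb, List.mem_cons]
      constructor
      · rintro (rfl | hx)
        · exact ⟨o, hlk, pvBuildF_pres rest _ o x List.lookup_cons_self⟩
        · obtain ⟨o', h1, h2⟩ := (ih ((o, t) :: fA) sA x).mp hx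
          have ho' : ¬ o' = o := by
            intro h; rw [h, List.lookup_cons_self] at h1; cases h1
          rw [pvLookup_cons_ne _ _ _ _ ho'] at h1
          exact ⟨o', h1, h2⟩
      · rintro ⟨o', h1, h2⟩
        by_cases ho' : o' = o
        · subst ho'
          have := pvBuildF_pres rest ((o', t) :: fA) o' t List.lookup_cons_self
          rw [this] at h2
          injection h2 with h3
          exact Or.inl h3.symm
        · refine Or.inr ((ih ((o, t) :: fA) sA x).mpr ⟨o', ?_, h2⟩)
          rw [pvLookup_cons_ne _ _ _ _ ho']
          exact h1
    | some f =>
      have hb : pvBuildF ((t, o, l) :: rest) fA = pvBuildF rest fA := by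
        simp [pvBuildF, hlk]
      have hg : (pvG ((t, o, l) :: rest) fA sA).1 =
          (pvG rest fA (if sA.lookup o = none ∧ t ≠ f then (o, t) :: sA else sA)).1 := by
        by_cases hcond : sA.lookup o = none ∧ t ≠ f
        · simp [pvG, hlk, hcond]
        · rw [if_neg hcond]; simp [pvG, hlk]
          rw [if_neg hcond]
      rw [hg, hb]
      exact ih fA _ x

-- running B's pass with the completed firsts table picks the same seconds
theorem pvG_snd_ext (F : List (String × String)) :
    ∀ (S : List (String × String × Int)) (fA sA : List (String × String)),
      (∀ o, F.lookup o = (pvBuildF S fA).lookup o) →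
      (pvG S fA sA).2 = (pvG S F sA).2 := by
  intro S
  induction S with
  | nil => intro fA sA _; rfl
  | cons q rest ih =>
    intro fA sA hF
    obtain ⟨t, o, l⟩ := q
    cases hlk : fA.lookup o with
    | none =>
      have hb : pvBuildF ((t, o, l) :: rest) fA = pvBuildF rest ((o, t) :: fA) := by
        simp [pvBuildF, hlk]
      have hFo : F.lookup o = some t := by
        rw [hF o, hb]
        exact pvBuildF_pres rest _ o t List.lookup_cons_self
      have hgL : (pvG ((t, o, l) :: rest) fA sA).2 = (pvG rest ((o, t) :: fA) sA).2 := by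
        simp [pvG, hlk]
      have hgR : (pvG ((t, o, l) :: rest) F sA).2 = (pvG rest F sA).2 := by
        simp [pvG, hFo]
      rw [hgL, hgR]
      exact ih ((o, t) :: fA) sA (fun o' => by rw [hF o', hb])
    | some f =>
      have hb : pvBuildF ((t, o, l) :: rest) fA = pvBuildF rest fA := by
        simp [pvBuildF, hlk]
      have hFo : F.lookup o = some f := by
        rw [hF o, hb]
        exact pvBuildF_pres rest fA o f hlk
      have hgL : (pvG ((t, o, l) :: rest) fA sA) =
          (if sA.lookup o = none ∧ t ≠ f then
            ((pvG rest fA ((o, t) :: sA)).1, t :: (pvG rest fA ((o, t) :: sA)).2)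
          else pvG rest fA sA) := by
        simp [pvG, hlk]
      have hgR : (pvG ((t, o, l) :: rest) F sA) =
          (if sA.lookup o = none ∧ t ≠ f then
            ((pvG rest F ((o, t) :: sA)).1, t :: (pvG rest F ((o, t) :: sA)).2)
          else pvG rest F sA) := by
        simp [pvG, hFo]
      rw [hgL, hgR]
      by_cases hcond : sA.lookup o = none ∧ t ≠ f
      · rw [if_pos hcond, if_pos hcond]
        simp only []
        rw [ih fA ((o, t) :: sA) (fun o' => by rw [hF o', hb])]
      · rw [if_neg hcond, if_neg hcond]
        exact ih fA sA (fun o' => by rw [hF o', hb])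

-- A's parse fold, named
theorem pvParsedA (tc : List String) :
    tc.foldl pvParseStepA [] = (tc.map pvParse).filterMap id := by
  rw [pvParsedA_eq tc []]; rfl

-- every parsed entry carries its own output
theorem pvOKP (tc : List String) :
    ∀ p ∈ PySem.List.sorted ((tc.map pvParse).filterMap id) (fun x => x.2.2) false,
      p.2.1 = pvOut p.1 := by
  intro p hp
  rw [PySem.List.mem_sorted] at hp
  obtain ⟨a, ha, hid⟩ := List.mem_filterMap.mp hp
  obtain ⟨t, _, rfl⟩ := List.mem_map.mp ha
  obtain ⟨h1, h2⟩ := pvParse_shape t p hid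
  rw [h2, h1]

-- B collapses to [] when nothing parses
theorem pvAlt_emptyP (tc : List String) (n : Int) (h : (tc.map pvParse).filterMap id = []) :
    get_easy_test_cases_with_unique_outputs_alt tc n = [] := by
  simp only [get_easy_test_cases_with_unique_outputs_alt, h]
  by_cases hn : n ≤ 0
  · rw [if_pos hn]
  · rw [if_neg hn]
    have hs0 : PySem.List.sorted ([] : List (String × String × Int)) (fun x => x.2.2) false = [] :=
      (PySem.List.sorted_eq_nil_iff _ _ _).mpr rfl
    rw [hs0]
    simp only [List.foldl_nil]
    rw [PySem.List.slice_to _ (by omega)]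
    simp

-- A collapses to [] when nothing parses
theorem pvA_emptyP (tc : List String) (n : Int) (h : (tc.map pvParse).filterMap id = []) :
    get_easy_test_cases_with_unique_outputs tc n = [] := by
  simp only [get_easy_test_cases_with_unique_outputs, pvParsedA tc, h]
  by_cases htc : tc.length = 0
  · rw [if_pos htc]
  · rw [if_neg htc]
    have hs0 : PySem.List.sorted ([] : List (String × String × Int)) (fun x => x.2.2) false = [] :=
      (PySem.List.sorted_eq_nil_iff _ _ _).mpr rfl
    rw [hs0]
    simp only [pvLoop1]
    split_ifs with h1
    · simp [pvLoop2]
    · rfl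

-- the two ports agree for every positive n
theorem pvMain (tc : List String) (n : Int) (hn : 1 ≤ n) :
    get_easy_test_cases_with_unique_outputs tc n = get_easy_test_cases_with_unique_outputs_alt tc n := by
  by_cases htc : tc.length = 0
  · have htc' : tc = [] := List.length_eq_zero_iff.mp htc
    subst htc'
    rw [pvA_emptyP [] n rfl, pvAlt_emptyP [] n rfl]
  · simp only [get_easy_test_cases_with_unique_outputs,
      get_easy_test_cases_with_unique_outputs_alt, pvParsedA tc]
    rw [if_neg htc, if_neg (by omega : ¬ n ≤ 0)]
    set S := PySem.List.sorted ((tc.map pvParse).filterMap id) (fun x => x.2.2) false with hSdef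
    have hOKS : ∀ p ∈ S, p.2.1 = pvOut p.1 := pvOKP tc
    -- B's fold in assoc-list terms
    have hBf := pvBfold_eq S PySem.Dict.empty PySem.Dict.empty [] [] [] []
      (fun o => by rw [PySem.Dict.get?_empty]; rfl)
      (fun o => by rw [PySem.Dict.get?_empty]; rfl)
    set G1 := (pvG S [] []).1 with hG1def
    set G2 := (pvG S [] []).2 with hG2def
    rw [hBf.1, hBf.2, List.nil_append, List.nil_append,
      PySem.List.slice_to _ (by omega : (0:Int) ≤ n)]
    -- round 1 in the same terms
    have hloop := pvLoop1_eq n S [] PySem.Set.empty [] []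
      (fun o => by simp) (by simp; omega)
    obtain ⟨h1, h2⟩ := hloop
    rw [List.nil_append] at h1 h2
    rw [← hG1def] at h1 h2
    by_cases hlt : (((pvLoop1 n S [] PySem.Set.empty).1.length : Int)) < n
    · rw [if_pos hlt]
      have hG1len : (G1.length : Int) < n := by
        by_contra hcon
        push Not at hcon
        rw [h1, List.length_take] at hlt
        have : n.toNat ≤ G1.length := by omega
        rw [Nat.min_eq_left this] at hlt
        omega
      have hr1 : (pvLoop1 n S [] PySem.Set.empty).1 = G1 := by
        rw [h1]
        exact List.take_of_length_le (by omega)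
      have hseenchar := h2 hG1len
      have hI1 : ∀ p ∈ S, ((pvLoop1 n S [] PySem.Set.empty).1.contains p.1 = true ↔
          ((pvBuildF S []).lookup p.2.1 = some p.1 ∨
            (List.lookup p.2.1 ([] : List (String × String))) = some p.1)) := by
        intro p hp
        rw [hr1]
        constructor
        · intro hc
          obtain ⟨o, -, ho⟩ := (pvMem_pvG_fst S [] [] p.1).mp (List.contains_iff_mem.mp hc)
          rcases pvBuildF_sub S [] o p.1 ho with hx | ⟨l', hl'⟩
          · cases hx
          · have hoq : o = pvOut p.1 := hOKS (p.1, o, l') hl'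
            have hpp : p.2.1 = pvOut p.1 := hOKS p hp
            left
            rw [hpp, ← hoq]
            exact ho
        · rintro (hx | hx)
          · exact List.contains_iff_mem.mpr ((pvMem_pvG_fst S [] [] p.1).mpr ⟨p.2.1, rfl, hx⟩)
          · cases hx
      have happ := pvLoop2_eq n (pvLoop1 n S [] PySem.Set.empty).2 (pvBuildF S []) S
        (pvLoop1 n S [] PySem.Set.empty).1 PySem.Dict.empty []
        (fun p hp => (hseenchar p.2.1).mpr (pvBuildF_covers S [] p hp))
        hOKS
        (fun p hp => pvBuildF_covers S [] p hp)
        hI1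
        (fun o => by
          rw [PySem.Dict.getD_empty]
          exact ⟨le_refl 0, by simp⟩)
        (by rw [hr1]; exact hG1len)
      rw [happ, hr1]
      rw [← pvG_snd_ext (pvBuildF S []) S [] [] (fun o => rfl)]
    · rw [if_neg hlt]
      have hlen1 : n.toNat ≤ G1.length := by
        by_contra hcon
        push Not at hcon
        rw [h1, List.length_take, Nat.min_eq_right (le_of_lt hcon)] at hlt
        omega
      rw [h1, List.take_append, Nat.sub_eq_zero_of_le hlen1, List.take_zero, List.append_nil]

-- ===== VERDICT (by name: the statement is the Claim_ definition above) =====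
theorem get_easy_test_cases_with_unique_outputs_spec : Claim_unchanged_get_easy_test_cases_with_unique_outputs := by
  intro tc n _
  unfold Spec_get_easy_test_cases_with_unique_outputs
  intro hnd
  by_cases hn : 1 ≤ n
  · exact pvMain tc n hn
  · have hnop : ¬ ∃ t ∈ tc, pvParses t = true := fun hex =>
      hnd ⟨by omega, hex⟩
    have hP : (tc.map pvParse).filterMap id = [] := by
      rw [List.filterMap_eq_nil_iff]
      intro a ha
      obtain ⟨t, ht, rfl⟩ := List.mem_map.mp ha
      cases h : pvParse t with
      | none => rfl
      | some p =>
        exact absurd ⟨t, ht, by rw [← pvParse_isSome, h]; rfl⟩ hnop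
    rw [pvA_emptyP tc n hP, pvAlt_emptyP tc n hP]
theorem get_easy_test_cases_with_unique_outputs_changed : Claim_changed_get_easy_test_cases_with_unique_outputs := by
  unfold Claim_changed_get_easy_test_cases_with_unique_outputs; decide
theorem get_easy_test_cases_with_unique_outputs_tight : Claim_exact_get_easy_test_cases_with_unique_outputs := by
  intro tc n _ hd
  obtain ⟨hn0, t, ht, hp⟩ := hd
  have hB : get_easy_test_cases_with_unique_outputs_alt tc n = [] := by
    simp only [get_easy_test_cases_with_unique_outputs_alt]
    rw [if_pos hn0]
  rw [hB]
  have hp' : (pvParse t).isSome := by rw [pvParse_isSome, hp]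
  obtain ⟨p, hp2⟩ := Option.isSome_iff_exists.mp hp'
  have hPne : (tc.map pvParse).filterMap id ≠ [] := by
    intro h
    have hmem : p ∈ (tc.map pvParse).filterMap id :=
      List.mem_filterMap.mpr ⟨some p, List.mem_map.mpr ⟨t, ht, hp2⟩, rfl⟩
    rw [h] at hmem
    cases hmem
  have hSne : PySem.List.sorted ((tc.map pvParse).filterMap id) (fun x => x.2.2) false ≠ [] := by
    rw [Ne, PySem.List.sorted_eq_nil_iff]
    exact hPne
  obtain ⟨q, rest, hS⟩ := List.exists_cons_of_ne_nil hSne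
  have htcne : ¬ tc.length = 0 := by
    intro h
    rw [List.length_eq_zero_iff.mp h] at ht
    cases ht
  simp only [get_easy_test_cases_with_unique_outputs, pvParsedA tc, hS]
  rw [if_neg htcne]
  obtain ⟨t0, o0, l0⟩ := q
  have hc0 : PySem.Set.contains PySem.Set.empty o0 = false := rfl
  have hstep : pvLoop1 n ((t0, o0, l0) :: rest) [] PySem.Set.empty =
      ([t0], PySem.Set.add PySem.Set.empty o0) := by
    simp only [pvLoop1]
    rw [if_pos hc0, if_pos (by simp; omega : n ≤ ((([] : List String) ++ [t0]).length : Int))]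
    simp
  rw [hstep]
  rw [if_neg (by simp; omega : ¬ (([t0] : List String).length : Int) < n)]
  simp
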